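-- pv_equiv track=rewrite | github.com/jakob655/ProcessMiningVisualization_Schuetz_WS2025 | mining_algorithms/alpha_mining.py | _calculate_parallel
-- ===== SOURCE A (Python) =====
-- def _calculate_parallel(direct_succession):
--     parallel = []
--     for pair in direct_succession:
--         pair_reversed = (pair[1], pair[0])
--         if pair_reversed in direct_succession:
--             pair_not_reversed = (pair[0], pair[1])
--             parallel.append(pair_not_reversed)
--     return set(parallel)
-- ===== SOURCE B (Python) =====
-- def _calculate_parallel(direct_succession):
--     # Aggregate orientations per undirected edge: for each canonical key (sorted
--     # endpoint pair) record which of the two directions occurs; a pair is parallel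
--     # iff its edge has both directions (or is a self-loop).
--     flags = {}
--     for a, b in direct_succession:
--         key = (a, b) if a <= b else (b, a)
--         fwd, bwd = flags.get(key, (False, False))
--         if (a, b) == key:
--             fwd = True
--         else:
--             bwd = True
--         flags[key] = (fwd, bwd)
--     parallel = set()
--     for a, b in direct_succession:
--         key = (a, b) if a <= b else (b, a)
--         fwd, bwd = flags[key]
--         if (fwd and bwd) or a == b:
--             parallel.add((a, b))
--     return parallel
-- ===== Notes on version B (the rewrite author's own statement) =====
-- stated objective: alternative
-- what changed: B groups the pairs by their undirected (canonically ordered) edge in one aggregation pass recording which of the two orientations occur, then a second pass keeps pairs whose edge saw both orientations (or is a self-loop); A instead tests per pair whether its reverse is a member of the input list.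
import Mathlib
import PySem

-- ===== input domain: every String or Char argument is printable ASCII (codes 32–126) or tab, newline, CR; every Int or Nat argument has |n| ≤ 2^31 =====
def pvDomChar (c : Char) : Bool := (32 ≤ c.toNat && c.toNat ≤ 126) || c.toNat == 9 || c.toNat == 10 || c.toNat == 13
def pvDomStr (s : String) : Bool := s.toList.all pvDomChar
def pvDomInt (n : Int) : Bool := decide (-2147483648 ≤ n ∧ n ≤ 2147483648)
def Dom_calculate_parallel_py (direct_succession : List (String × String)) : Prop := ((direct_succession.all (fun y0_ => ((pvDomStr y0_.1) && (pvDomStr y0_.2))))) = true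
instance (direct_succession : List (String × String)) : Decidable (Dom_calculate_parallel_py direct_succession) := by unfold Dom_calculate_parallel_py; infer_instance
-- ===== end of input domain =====

-- B replaces A's per-pair reversed-membership scan with a group-by pass that records,
-- per undirected edge (canonical endpoint pair), which orientations occur, then a
-- selection pass keeping pairs whose edge saw both orientations (alternative decomposition).

-- ===== PORT A =====
def calculate_parallel_py (direct_succession : List (String × String)) : List (String × String) :=
  -- parallel = []; for pair in direct_succession: if (pair[1],pair[0]) in direct_succession: parallel.append((pair[0],pair[1]))
  let parallel := direct_succession.foldl
    (fun acc pair =>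
      if direct_succession.contains (pair.2, pair.1) then acc ++ [(pair.1, pair.2)] else acc)
    []
  PySem.Set.ofList parallel  -- return set(parallel)

-- ===== PORT B =====
def calculate_parallel_py_alt (direct_succession : List (String × String)) : List (String × String) :=
  -- pass 1: flags[key] = (fwd, bwd) orientation record per canonical (sorted) endpoint pair
  let flags := direct_succession.foldl
    (fun d p =>
      let key := if p.1 ≤ p.2 then (p.1, p.2) else (p.2, p.1)
      let fb := d.getD key (false, false)   -- flags.get(key, (False, False))
      let fb := if (p.1, p.2) = key then (true, fb.2) else (fb.1, true)
      d.insert key fb)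
    PySem.Dict.empty
  -- pass 2: parallel = set(); add pairs whose edge saw both orientations (or self-loop)
  direct_succession.foldl
    (fun s p =>
      let key := if p.1 ≤ p.2 then (p.1, p.2) else (p.2, p.1)
      let fb := flags.getD key (false, false)  -- flags[key]; key is always present after pass 1, so getD is exact
      if (fb.1 && fb.2) || p.1 == p.2 then PySem.Set.add s (p.1, p.2) else s)
    PySem.Set.empty

-- ===== PRECONDITION & SPEC =====
def Spec_calculate_parallel_py (direct_succession : List (String × String)) (out : List (String × String)) : Prop := out = calculate_parallel_py_alt direct_succession
instance (direct_succession : List (String × String)) (out : List (String × String)) : Decidable (Spec_calculate_parallel_py direct_succession out) := by unfold Spec_calculate_parallel_py; infer_instance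

-- ===== CLAIM (what is proved, stated in full; the proofs are below) =====
def Claim_equal_calculate_parallel_py : Prop := ∀ (direct_succession : List (String × String)), Dom_calculate_parallel_py direct_succession → Spec_calculate_parallel_py direct_succession (calculate_parallel_py direct_succession)

-- ===== LEMMAS AND PROOFS =====

-- characterisation of the pass-1 dictionary: the flag pair stored at any key k
theorem pv_flags_getD (l : List (String × String)) (d : PySem.Dict (String × String) (Bool × Bool)) (k : String × String) :
    (l.foldl (fun d p =>
        let key := if p.1 ≤ p.2 then (p.1, p.2) else (p.2, p.1)
        let fb := d.getD key (false, false)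
        let fb := if (p.1, p.2) = key then (true, fb.2) else (fb.1, true)
        d.insert key fb) d).getD k (false, false) =
      ((d.getD k (false, false)).1 || l.any (fun p => decide ((if p.1 ≤ p.2 then (p.1, p.2) else (p.2, p.1)) = k ∧ (p.1, p.2) = k)),
       (d.getD k (false, false)).2 || l.any (fun p => decide ((if p.1 ≤ p.2 then (p.1, p.2) else (p.2, p.1)) = k ∧ (p.1, p.2) ≠ k))) := by
  induction l generalizing d with
  | nil => simp
  | cons x xs ih =>
    simp only [List.foldl_cons, List.any_cons]
    rw [ih]
    by_cases hk : (if x.1 ≤ x.2 then (x.1, x.2) else (x.2, x.1)) = k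
    · rw [hk]
      by_cases hx : (x.1, x.2) = k
      · simp [hx, PySem.Dict.getD_insert_self]
      · simp [hx, PySem.Dict.getD_insert_self]
    · have hne : ¬ k = (if x.1 ≤ x.2 then (x.1, x.2) else (x.2, x.1)) := fun h => hk h.symm
      have h1 : decide ((if x.1 ≤ x.2 then (x.1, x.2) else (x.2, x.1)) = k ∧ (x.1, x.2) = k) = false :=
        decide_eq_false (fun h => hk h.1)
      have h2 : decide ((if x.1 ≤ x.2 then (x.1, x.2) else (x.2, x.1)) = k ∧ (x.1, x.2) ≠ k) = false :=
        decide_eq_false (fun h => hk h.1)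
      rw [h1, h2]
      show ((((fun (d : PySem.Dict (String × String) (Bool × Bool)) (p : String × String) =>
          let key := if p.1 ≤ p.2 then (p.1, p.2) else (p.2, p.1)
          let fb := d.getD key (false, false)
          let fb := if (p.1, p.2) = key then (true, fb.2) else (fb.1, true)
          d.insert key fb) d x).getD k (false, false)).1 || _,
        (((fun (d : PySem.Dict (String × String) (Bool × Bool)) (p : String × String) =>
          let key := if p.1 ≤ p.2 then (p.1, p.2) else (p.2, p.1)
          let fb := d.getD key (false, false)
          let fb := if (p.1, p.2) = key then (true, fb.2) else (fb.1, true)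
          d.insert key fb) d x).getD k (false, false)).2 || _) = _
      rw [show ((fun (d : PySem.Dict (String × String) (Bool × Bool)) (p : String × String) =>
          let key := if p.1 ≤ p.2 then (p.1, p.2) else (p.2, p.1)
          let fb := d.getD key (false, false)
          let fb := if (p.1, p.2) = key then (true, fb.2) else (fb.1, true)
          d.insert key fb) d x).getD k (false, false) = d.getD k (false, false) from by
        rw [show ((fun (d : PySem.Dict (String × String) (Bool × Bool)) (p : String × String) =>
            let key := if p.1 ≤ p.2 then (p.1, p.2) else (p.2, p.1)
            let fb := d.getD key (false, false)
            let fb := if (p.1, p.2) = key then (true, fb.2) else (fb.1, true)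
            d.insert key fb) d x) = d.insert (if x.1 ≤ x.2 then (x.1, x.2) else (x.2, x.1))
              (if (x.1, x.2) = (if x.1 ≤ x.2 then (x.1, x.2) else (x.2, x.1))
                then (true, (d.getD (if x.1 ≤ x.2 then (x.1, x.2) else (x.2, x.1)) (false, false)).2)
                else ((d.getD (if x.1 ≤ x.2 then (x.1, x.2) else (x.2, x.1)) (false, false)).1, true)) from rfl]
        rw [PySem.Dict.getD_insert, if_neg hne]]
      simp

-- B's selection test agrees with A's reversed-membership test on members of l
theorem pv_cond_eq (l : List (String × String)) (a b : String) (hp : (a, b) ∈ l) :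
    (((l.any (fun q => decide ((if q.1 ≤ q.2 then (q.1, q.2) else (q.2, q.1)) = (if a ≤ b then (a, b) else (b, a)) ∧ (q.1, q.2) = (if a ≤ b then (a, b) else (b, a))))) &&
      (l.any (fun q => decide ((if q.1 ≤ q.2 then (q.1, q.2) else (q.2, q.1)) = (if a ≤ b then (a, b) else (b, a)) ∧ (q.1, q.2) ≠ (if a ≤ b then (a, b) else (b, a)))))) ||
      (a == b)) = l.contains (b, a) := by
  apply Bool.eq_iff_iff.mpr
  simp only [Bool.or_eq_true, Bool.and_eq_true, List.any_eq_true, decide_eq_true_eq,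
    beq_iff_eq, List.contains_eq_mem]
  by_cases heq : a = b
  · subst heq
    simp [hp]
  · by_cases hab : a ≤ b
    · -- a < b: key = (a,b); fwd is witnessed by (a,b) itself, bwd ⟺ (b,a) ∈ l
      have hba : ¬ b ≤ a := not_le.mpr (lt_of_le_of_ne hab heq)
      simp only [if_pos hab]
      constructor
      · rintro (⟨-, ⟨⟨x, y⟩, hq2, hc2, hne2⟩⟩ | heq') 
        · -- the bwd witness must be (b,a)
          by_cases hxy : x ≤ y
          · exact absurd (by simpa [hxy] using hc2) (fun h => hne2 (by simpa [hxy] using hc2))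
          · have hyx : (y, x) = (a, b) := by simpa [hxy] using hc2
            obtain ⟨hy, hx⟩ := Prod.ext_iff.mp hyx
            subst hy; subst hx; exact hq2
        · exact absurd heq' heq
      · intro h
        refine Or.inl ⟨⟨(a, b), hp, by simp [hab], by simp⟩, ⟨(b, a), h, by simp [hba], ?_⟩⟩
        intro h'
        exact heq ((Prod.ext_iff.mp h').2)
    · -- b < a: key = (b,a); bwd is witnessed by (a,b) itself, fwd ⟺ (b,a) ∈ l
      have hba : b ≤ a := le_of_lt (not_le.mp hab)
      simp only [if_neg hab]
      constructor
      · rintro (⟨⟨⟨x, y⟩, hq1, hc1, he1⟩, -⟩ | heq')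
        · have : (x, y) = (b, a) := he1
          exact this ▸ hq1
        · exact absurd heq' heq
      · intro h
        refine Or.inl ⟨⟨(b, a), h, by simp [hba], by simp⟩, ⟨(a, b), hp, by simp [hab], ?_⟩⟩
        intro h'
        exact heq ((Prod.ext_iff.mp h').1)

-- the conditional-add loop over a filtered list is set(...) of the filtered list
theorem pv_fold_add_eq_ofList (l : List (String × String)) :
    l.foldl (fun s p => PySem.Set.add s (p.1, p.2)) PySem.Set.empty = PySem.Set.ofList l := by
  rw [PySem.Set.ofList_eq_foldl]
  rfl

-- ===== VERDICT (by name: the statement is the Claim_ definition above) =====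
theorem calculate_parallel_py_spec : Claim_equal_calculate_parallel_py := by
  intro l _
  show calculate_parallel_py l = calculate_parallel_py_alt l
  unfold calculate_parallel_py calculate_parallel_py_alt
  rw [PySem.List.foldl_append_if_eq_filter, List.nil_append,
      PySem.List.foldl_if_eq_foldl_filter, pv_fold_add_eq_ofList]
  show PySem.Set.ofList (List.filter (fun pair => l.contains (pair.2, pair.1)) l) = _
  congr 1
  apply List.filter_congr
  intro p hp
  rw [pv_flags_getD l PySem.Dict.empty]
  simp only [PySem.Dict.getD_empty, Bool.false_or]
  obtain ⟨a, b⟩ := p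
  exact (pv_cond_eq l a b hp).symm
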